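-- pv_equiv track=rewrite | github.com/SaarShai/Primes-Equispaced | experiments/large_scale_results.py | S_farey
-- ===== SOURCE A (Python) =====
-- def S_farey(m, N, M):
--     """
--     Compute S(m,N) = sum_{f in F_N} e^{2*pi*i*m*f} using the universal formula.
--     S(m,N) = M(N) + 1 + sum_{d|m, d>=2, d<=N} d * M[N//d]
--
--     Returns a real integer (since S(m,N) is always an integer for integer m).
--     """
--     result = int(M[N]) + 1
--     # Find divisors of m that are >= 2 and <= N
--     i = 2
--     while i * i <= m:
--         if m % i == 0:
--             if i <= N:
--                 result += i * int(M[N // i])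
--             j = m // i
--             if j != i and j >= 2 and j <= N:
--                 result += j * int(M[N // j])
--         i += 1
--     # m itself as a divisor (if m >= 2 and m <= N)
--     if m >= 2 and m <= N:
--         result += m * int(M[N // m])
--     return result
-- ===== SOURCE B (Python) =====
-- def S_farey(m, N, M):
--     """Same value as A: base term plus one linear scan over candidate
--     divisors d in 2..min(N, m); the min bound keeps m<=0 and m<2 cases exact."""
--     result = int(M[N]) + 1
--     for d in range(2, min(N, m) + 1):
--         if m % d == 0:
--             result += d * int(M[N // d])
--     return result
-- ===== Notes on version B (the rewrite author's own statement) =====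
-- stated objective: simpler
-- what changed: Replaced the sqrt-bounded divisor-pair loop with its three add sites (small divisor i, partner m//i, and m itself) by a single linear scan d in range(2, min(N, m)+1) adding d*M[N//d] for each divisor d.
import Mathlib
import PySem

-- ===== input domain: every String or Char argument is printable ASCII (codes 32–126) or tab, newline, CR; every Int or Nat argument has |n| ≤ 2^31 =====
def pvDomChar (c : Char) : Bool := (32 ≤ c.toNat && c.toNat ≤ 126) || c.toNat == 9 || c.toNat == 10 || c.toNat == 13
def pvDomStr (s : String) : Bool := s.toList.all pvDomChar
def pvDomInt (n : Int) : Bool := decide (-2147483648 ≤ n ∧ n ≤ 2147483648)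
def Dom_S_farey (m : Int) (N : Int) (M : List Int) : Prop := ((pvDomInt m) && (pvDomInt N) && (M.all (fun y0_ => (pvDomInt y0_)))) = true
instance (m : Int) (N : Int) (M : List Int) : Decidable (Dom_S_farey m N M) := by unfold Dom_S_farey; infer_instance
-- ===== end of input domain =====

-- B replaces A's sqrt-bounded divisor-pair loop (three separate add sites) by one
-- linear scan over d in 2..min(N,m); objective: simpler, same return value.

-- ===== PORT A =====
-- the while loop of A: i runs while i*i <= m, threading `result`
def S_fareyLoop (m N : Int) (M : List Int) (i result : Int) : Int :=
  if h : i * i ≤ m then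
    let r1 :=
      if PySem.Int.mod m i = 0 then
        let r2 := if i ≤ N then result + i * ((PySem.List.pyGet? M (PySem.Int.floordiv N i)).getD 0) else result
        let j := PySem.Int.floordiv m i
        if j ≠ i ∧ 2 ≤ j ∧ j ≤ N then r2 + j * ((PySem.List.pyGet? M (PySem.Int.floordiv N j)).getD 0) else r2
      else result
    S_fareyLoop m N M (i + 1) r1
  else result
termination_by (m + 1 - i).toNat
decreasing_by
  have hi : i ≤ m := by
    rcases le_or_gt i 0 with h' | h'
    · nlinarith [mul_self_nonneg i]
    · nlinarith
  omega

def S_farey (m : Int) (N : Int) (M : List Int) : Int :=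
  let result : Int := (PySem.List.pyGet? M N).getD 0 + 1
  let result := S_fareyLoop m N M 2 result
  if 2 ≤ m ∧ m ≤ N then result + m * ((PySem.List.pyGet? M (PySem.Int.floordiv N m)).getD 0) else result

-- ===== PORT B =====
def S_farey_alt (m : Int) (N : Int) (M : List Int) : Int :=
  (PySem.List.pyRange 2 (min N m + 1) 1).foldl
    (fun result d =>
      if PySem.Int.mod m d = 0 then result + d * ((PySem.List.pyGet? M (PySem.Int.floordiv N d)).getD 0) else result)
    ((PySem.List.pyGet? M N).getD 0 + 1)

-- ===== PRECONDITION & SPEC =====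
-- Python A raises IndexError exactly when the initial M[N] is out of range; every
-- later index N//d (only reached for 2 ≤ d ≤ N) is then automatically in range.
def Pre_S_farey (m : Int) (N : Int) (M : List Int) : Prop := PySem.Raise.InRange M.length N
instance (m : Int) (N : Int) (M : List Int) : Decidable (Pre_S_farey m N M) := by unfold Pre_S_farey; infer_instance
def pvWitness_S_farey : Int × Int × List Int := (6, 3, [1, 2, 3, 4])

def Spec_S_farey (m : Int) (N : Int) (M : List Int) (out : Int) : Prop := out = S_farey_alt m N M
instance (m : Int) (N : Int) (M : List Int) (out : Int) : Decidable (Spec_S_farey m N M out) := by unfold Spec_S_farey; infer_instance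

-- ===== CLAIM (what is proved, stated in full; the proofs are below) =====
def Claim_equal_S_farey : Prop := ∀ (m : Int) (N : Int) (M : List Int), Dom_S_farey m N M → Pre_S_farey m N M → Spec_S_farey m N M (S_farey m N M)

-- ===== LEMMAS AND PROOFS =====

-- the summand both programs add for a divisor d: d * M[N // d]
def pvTerm (N : Int) (M : List Int) (d : Int) : Int :=
  d * ((PySem.List.pyGet? M (PySem.Int.floordiv N d)).getD 0)

theorem pv_le_self_mul_self {d : Int} (h : 1 ≤ d) : d ≤ d * d := by nlinarith

-- A's loop guard i*i ≤ m is exactly i ≤ ⌊√m⌋ (for positive i)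
theorem pv_sq_le_iff_le_sqrt {i m : Int} (hi : 1 ≤ i) : i * i ≤ m ↔ i ≤ Int.sqrt m := by
  unfold Int.sqrt
  rcases le_or_gt 0 m with hm | hm
  · have h1 : i = (i.toNat : Int) := by omega
    have h2 : m = (m.toNat : Int) := by omega
    rw [h1, h2, ← Nat.cast_mul, Nat.cast_le, Nat.cast_le, Int.toNat_natCast, ← Nat.pow_two]
    exact (Nat.le_sqrt').symm
  · constructor
    · intro h; nlinarith
    · intro h
      have h0 : m.toNat = 0 := by omega
      rw [h0] at h; simp at h; omega

-- fold of an "add g d if P d" step is the sum of the guarded terms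
theorem pv_foldl_ite_add (P : Int → Prop) [DecidablePred P] (g : Int → Int) (l : List Int) (a : Int) :
    l.foldl (fun acc d => if P d then acc + g d else acc) a
      = a + (l.map (fun d => if P d then g d else 0)).sum := by
  induction l generalizing a with
  | nil => simp
  | cons x xs ih => simp only [List.foldl_cons, List.map_cons, List.sum_cons, ih]; split_ifs <;> ring

theorem pv_Icc_succ_right (a b : Int) (h : a ≤ b + 1) :
    Finset.Icc a (b + 1) = insert (b + 1) (Finset.Icc a b) := by
  ext x; simp [Finset.mem_Icc]; omega

theorem pv_sum_map_pyRange (f : Int → Int) (a b : Int) :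
    ((PySem.List.pyRange a b 1).map f).sum = ∑ d ∈ Finset.Icc a (b - 1), f d := by
  induction hn : (b - a).toNat generalizing b with
  | zero =>
    have hb : b ≤ a := by omega
    rw [PySem.List.pyRange_one_eq_nil hb, Finset.Icc_eq_empty (by omega)]
    simp
  | succ n ih =>
    have hb : a ≤ b - 1 := by omega
    have h1 : b = (b - 1) + 1 := by omega
    rw [h1, PySem.List.pyRange_one_succ_right hb, List.map_append, List.sum_append,
        ih (b - 1) (by omega)]
    rw [show b - 1 + 1 - 1 = (b - 1 - 1) + 1 by omega, pv_Icc_succ_right a (b - 1 - 1) (by omega),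
        Finset.sum_insert (by simp [Finset.mem_Icc])]
    simp [show b - 1 - 1 + 1 = b - 1 by omega]
    ring

-- A's while loop from i accumulates the per-i contributions for i in [i, √m]
theorem pv_loop_sum (m N : Int) (M : List Int) (i acc : Int) (hi : 1 ≤ i) :
    S_fareyLoop m N M i acc
      = acc + ∑ k ∈ Finset.Icc i (Int.sqrt m),
          ((if PySem.Int.mod m k = 0 ∧ k ≤ N then pvTerm N M k else 0) +
           (if PySem.Int.mod m k = 0 ∧ (PySem.Int.floordiv m k ≠ k ∧ 2 ≤ PySem.Int.floordiv m k ∧ PySem.Int.floordiv m k ≤ N)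
              then pvTerm N M (PySem.Int.floordiv m k) else 0)) := by
  have H : ∀ (n : Nat) (i acc : Int), 1 ≤ i → (m + 1 - i).toNat ≤ n →
      S_fareyLoop m N M i acc
        = acc + ∑ k ∈ Finset.Icc i (Int.sqrt m),
            ((if PySem.Int.mod m k = 0 ∧ k ≤ N then pvTerm N M k else 0) +
             (if PySem.Int.mod m k = 0 ∧ (PySem.Int.floordiv m k ≠ k ∧ 2 ≤ PySem.Int.floordiv m k ∧ PySem.Int.floordiv m k ≤ N)
                then pvTerm N M (PySem.Int.floordiv m k) else 0)) := by
    intro n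
    induction n with
    | zero =>
      intro i acc h1 hn
      have hgt : ¬ (i * i ≤ m) := by
        intro h
        have : i ≤ m := by nlinarith
        omega
      rw [S_fareyLoop, dif_neg hgt, Finset.Icc_eq_empty (by rw [← pv_sq_le_iff_le_sqrt h1] at *; omega)]
      simp
    | succ n ih =>
      intro i acc h1 hn
      by_cases h : i * i ≤ m
      · rw [S_fareyLoop, dif_pos h]
        have hle : i ≤ m := by nlinarith
        rw [ih (i + 1) _ (by omega) (by omega)]
        have hir : i ≤ Int.sqrt m := (pv_sq_le_iff_le_sqrt h1).mp h
        rw [show Finset.Icc i (Int.sqrt m) = insert i (Finset.Icc (i + 1) (Int.sqrt m)) by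
              ext x; simp [Finset.mem_Icc]; omega,
            Finset.sum_insert (by simp [Finset.mem_Icc])]
        simp only [pvTerm]
        by_cases hmod : PySem.Int.mod m i = 0
        · simp only [hmod, true_and]
          split_ifs <;> ring
        · simp only [hmod, false_and, if_false]
          ring
      · rw [S_fareyLoop, dif_neg h, Finset.Icc_eq_empty (by rw [← pv_sq_le_iff_le_sqrt h1] at *; omega)]
        simp
  exact H (m + 1 - i).toNat i acc hi le_rfl

-- a divisor k of m and its cofactor m / k determine each other
theorem pv_partner {m k : Int} (h2 : 2 ≤ k) (hdvd : k ∣ m) (hmpos : 0 < m) :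
    k * (m / k) = m ∧ 1 ≤ m / k ∧ (m / k) ∣ m ∧ m / (m / k) = k := by
  have hm : k * (m / k) = m := Int.mul_ediv_cancel' hdvd
  have hj1 : 1 ≤ m / k := by nlinarith
  refine ⟨hm, hj1, ⟨k, by rw [mul_comm]; exact hm.symm⟩, ?_⟩
  have h3 : m / (m / k) = k * (m / k) / (m / k) := by rw [hm]
  rw [h3]
  exact Int.mul_ediv_cancel k (show m / k ≠ 0 by omega)

-- the heart: A's pair enumeration up to √m plus its m-term equals B's linear enumeration
theorem pv_divisor_sum (t : Int → Int) (m N : Int) :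
    (∑ k ∈ Finset.Icc 2 (Int.sqrt m),
        ((if k ∣ m ∧ k ≤ N then t k else 0) +
         (if k ∣ m ∧ (m / k ≠ k ∧ 2 ≤ m / k ∧ m / k ≤ N) then t (m / k) else 0)))
      + (if 2 ≤ m ∧ m ≤ N then t m else 0)
      = ∑ d ∈ Finset.Icc 2 (min N m), (if d ∣ m then t d else 0) := by
  classical
  rw [Finset.sum_add_distrib, ← Finset.sum_filter, ← Finset.sum_filter, ← Finset.sum_filter]
  rw [← Finset.sum_filter_add_sum_filter_not
        ((Finset.Icc 2 (min N m)).filter (fun d => d ∣ m)) (fun d => d * d ≤ m) t]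
  rw [← Finset.sum_filter_add_sum_filter_not
        (((Finset.Icc 2 (min N m)).filter (fun d => d ∣ m)).filter (fun d => ¬ d * d ≤ m)) (fun d => d = m) t]
  have e1 : (Finset.Icc 2 (Int.sqrt m)).filter (fun k => k ∣ m ∧ k ≤ N)
      = ((Finset.Icc 2 (min N m)).filter (fun d => d ∣ m)).filter (fun d => d * d ≤ m) := by
    rw [Finset.filter_filter]
    ext d
    simp only [Finset.mem_filter, Finset.mem_Icc]
    constructor
    · rintro ⟨⟨h2, hr⟩, hdvd, hN⟩
      have hdd : d * d ≤ m := (pv_sq_le_iff_le_sqrt (i:=d) (m:=m) (by omega)).mpr hr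
      have hdm : d ≤ m := le_trans (pv_le_self_mul_self (by omega)) hdd
      exact ⟨⟨h2, by omega⟩, hdvd, hdd⟩
    · rintro ⟨⟨h2, hK⟩, hdvd, hdd⟩
      exact ⟨⟨h2, (pv_sq_le_iff_le_sqrt (i:=d) (m:=m) (by omega)).mp hdd⟩, hdvd, by omega⟩
  have e3 : (if 2 ≤ m ∧ m ≤ N then t m else 0)
      = ∑ d ∈ (((Finset.Icc 2 (min N m)).filter (fun d => d ∣ m)).filter (fun d => ¬ d * d ≤ m)).filter (fun d => d = m), t d := by
    rw [Finset.filter_filter, Finset.filter_filter]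
    by_cases hc : 2 ≤ m ∧ m ≤ N
    · rw [if_pos hc]
      have hset : (Finset.Icc 2 (min N m)).filter (fun d => d ∣ m ∧ ¬ d * d ≤ m ∧ d = m) = {m} := by
        ext d
        simp only [Finset.mem_filter, Finset.mem_Icc, Finset.mem_singleton]
        constructor
        · rintro ⟨_, _, _, hd⟩; exact hd
        · rintro rfl
          exact ⟨⟨hc.1, by omega⟩, dvd_refl d, by nlinarith [hc.1], rfl⟩
      rw [hset, Finset.sum_singleton]
    · rw [if_neg hc]
      have hset : (Finset.Icc 2 (min N m)).filter (fun d => d ∣ m ∧ ¬ d * d ≤ m ∧ d = m) = ∅ := by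
        ext d
        simp only [Finset.mem_filter, Finset.mem_Icc, Finset.notMem_empty, iff_false]
        rintro ⟨⟨h2, hK⟩, _, _, rfl⟩
        omega
      rw [hset, Finset.sum_empty]
  have e2 : (∑ k ∈ (Finset.Icc 2 (Int.sqrt m)).filter (fun k => k ∣ m ∧ (m / k ≠ k ∧ 2 ≤ m / k ∧ m / k ≤ N)), t (m / k))
      = ∑ d ∈ (((Finset.Icc 2 (min N m)).filter (fun d => d ∣ m)).filter (fun d => ¬ d * d ≤ m)).filter (fun d => ¬ d = m), t d := by
    rw [Finset.filter_filter, Finset.filter_filter]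
    refine Finset.sum_nbij' (fun k => m / k) (fun d => m / d) ?_ ?_ ?_ ?_ ?_
    · -- the cofactor of a small divisor is a large divisor ≠ m
      intro k hk
      simp only [Finset.mem_filter, Finset.mem_Icc] at hk ⊢
      obtain ⟨⟨h2, hr⟩, hdvd, hne, hj2, hjN⟩ := hk
      have hkk : k * k ≤ m := (pv_sq_le_iff_le_sqrt (i:=k) (m:=m) (by omega)).mpr hr
      have hmpos : 0 < m := by nlinarith
      obtain ⟨hm, hj1, hjdvd, hback⟩ := pv_partner h2 hdvd hmpos
      have hklt : k < m / k := by
        have h1 : k * k ≤ k * (m / k) := by rw [hm]; exact hkk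
        have hkj : k ≤ m / k := le_of_mul_le_mul_left h1 (by omega)
        exact lt_of_le_of_ne hkj (Ne.symm hne)
      have hjm : m / k ≤ m := Int.le_of_dvd hmpos hjdvd
      have hjK : m / k ≤ min N m := by omega
      have hq : ¬ (m / k) * (m / k) ≤ m := by nlinarith
      refine ⟨⟨hj2, hjK⟩, hjdvd, hq, ?_⟩
      intro h
      rw [h] at hm
      nlinarith
    · -- the cofactor of a large divisor ≠ m is a small divisor
      intro d hd
      simp only [Finset.mem_filter, Finset.mem_Icc] at hd ⊢
      obtain ⟨⟨h2, hK⟩, hdvd, hq, hnem⟩ := hd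
      have hmpos : 0 < m := by omega
      obtain ⟨hm, hk1, hkdvd, hback⟩ := pv_partner h2 hdvd hmpos
      have hkd : m / d < d := by nlinarith
      have hk2 : 2 ≤ m / d := by
        rcases eq_or_lt_of_le hk1 with h | h
        · exfalso; apply hnem; rw [← hm, ← h]; ring
        · omega
      refine ⟨⟨hk2, (pv_sq_le_iff_le_sqrt (i:=m / d) (m:=m) (by omega)).mp (by nlinarith)⟩, hkdvd, ?_, ?_, ?_⟩
      · rw [hback]; omega
      · rw [hback]; omega
      · rw [hback]; omega
    · -- left inverse
      intro k hk
      simp only [Finset.mem_filter, Finset.mem_Icc] at hk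
      obtain ⟨⟨h2, hr⟩, hdvd, _⟩ := hk
      have hkk : k * k ≤ m := (pv_sq_le_iff_le_sqrt (i:=k) (m:=m) (by omega)).mpr hr
      have hmpos : 0 < m := by nlinarith
      exact (pv_partner h2 hdvd hmpos).2.2.2
    · -- right inverse
      intro d hd
      simp only [Finset.mem_filter, Finset.mem_Icc] at hd
      obtain ⟨⟨h2, hK⟩, hdvd, _, _⟩ := hd
      exact (pv_partner h2 hdvd (by omega)).2.2.2
    · intro k _; rfl
  rw [e1, e2, e3]
  ring

theorem pv_main (m N : Int) (M : List Int) : S_farey m N M = S_farey_alt m N M := by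
  have halt : S_farey_alt m N M = ((PySem.List.pyGet? M N).getD 0 + 1)
      + ∑ d ∈ Finset.Icc 2 (min N m), (if d ∣ m then pvTerm N M d else 0) := by
    unfold S_farey_alt
    rw [pv_foldl_ite_add (fun d => PySem.Int.mod m d = 0)
          (fun d => d * ((PySem.List.pyGet? M (PySem.Int.floordiv N d)).getD 0))]
    rw [pv_sum_map_pyRange, add_sub_cancel_right]
    simp only [PySem.Int.mod_eq_zero_iff_dvd, pvTerm]
  have hL : S_farey m N M = (((PySem.List.pyGet? M N).getD 0 + 1)
      + ∑ k ∈ Finset.Icc 2 (Int.sqrt m),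
          ((if k ∣ m ∧ k ≤ N then pvTerm N M k else 0) +
           (if k ∣ m ∧ (m / k ≠ k ∧ 2 ≤ m / k ∧ m / k ≤ N) then pvTerm N M (m / k) else 0)))
      + (if 2 ≤ m ∧ m ≤ N then pvTerm N M m else 0) := by
    unfold S_farey
    show (if 2 ≤ m ∧ m ≤ N
        then S_fareyLoop m N M 2 ((PySem.List.pyGet? M N).getD 0 + 1) + m * ((PySem.List.pyGet? M (PySem.Int.floordiv N m)).getD 0)
        else S_fareyLoop m N M 2 ((PySem.List.pyGet? M N).getD 0 + 1)) = _
    rw [pv_loop_sum m N M 2 _ (by norm_num)]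
    have hcong : ∀ k ∈ Finset.Icc 2 (Int.sqrt m),
        ((if PySem.Int.mod m k = 0 ∧ k ≤ N then pvTerm N M k else 0) +
         (if PySem.Int.mod m k = 0 ∧ (PySem.Int.floordiv m k ≠ k ∧ 2 ≤ PySem.Int.floordiv m k ∧ PySem.Int.floordiv m k ≤ N)
            then pvTerm N M (PySem.Int.floordiv m k) else 0))
        = ((if k ∣ m ∧ k ≤ N then pvTerm N M k else 0) +
           (if k ∣ m ∧ (m / k ≠ k ∧ 2 ≤ m / k ∧ m / k ≤ N) then pvTerm N M (m / k) else 0)) := by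
      intro k hk
      have h2 : 2 ≤ k := (Finset.mem_Icc.mp hk).1
      rw [PySem.Int.floordiv_eq_ediv_of_pos (by omega)]
      simp only [PySem.Int.mod_eq_zero_iff_dvd]
    rw [Finset.sum_congr rfl hcong]
    split_ifs with h
    · simp only [pvTerm]
    · simp only [pvTerm]
      ring
  rw [hL, halt, add_assoc, pv_divisor_sum (pvTerm N M) m N]

-- ===== VERDICT (by name: the statement is the Claim_ definition above) =====
theorem S_farey_spec : Claim_equal_S_farey := by
  intro m N M _ _
  exact pv_main m N M
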